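-- pv_equiv track=rewrite | github.com/Drakovek/ILikeFrog | i_like_frog/main/ilikefrog.py | english_to_frog
-- ===== SOURCE A (Python) =====
-- def pad_num(num:str=None, length:int=0) -> str:
--     """
--     Pads out a number string with zeros until the desired length.
--
--     :param num: Number string to pad out, defaults to None
--     :type num: str, optional
--     :param length: Length of the returned string, defaults to 0
--     :type length: int, optional
--     :return: Number string with the desired length, padded if necessary
--     :rtype: str
--     """
--     # Return string of length if given string is invalid
--     if num is None:
--         return pad_num("", length)
--     # Pad out number
--     padded = num
--     while len(padded) < length:
--         padded = "0" + padded
--     return padded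
--
-- def decimal_to_ternary(decimal:int=0) -> str:
--     """
--     Converts from a positive decimal integer to a ternary string.
--
--     :param decimal: Decimal integer, defaults to 0
--     :type decimal: int, optional
--     :return: String of ternary conversion of decimal
--     :rtype: str
--     """
--     # Returns "0" if decimal is negative or already 0
--     if decimal < 1:
--         return "0"
--     # Convert to ternary
--     main = decimal // 3
--     remainder = decimal % 3
--     if main == 0:
--         return str(remainder)
--     else:
--         return decimal_to_ternary(main) + str(remainder)
--
-- def english_to_frog(text:str=None) -> str:
--     """
--     Converts given text to "Frog-Talk"
--
--     :param text: Given English text to convert, defaults to None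
--     :type text: str, optional
--     :return: Given text converted to "Frog-Talk"
--     :rtype: str
--     """
--     # Return empty string if given text is invalid
--     if text is None:
--         return ""
--     # Run through every character in the given text
--     frog = ""
--     for cnum in range(0, len(text)):
--         # Get the decimal UTF-8 value of the current charcter.
--         char = ord(text[cnum])
--         # Check if character is in the ASCII range
--         if(char < 128):
--             # Add padded ternary value of the character to frog text
--             frog = frog + pad_num(decimal_to_ternary(char), 5)
--     # Convert ternary decimals to frog-speak terms
--     frog = frog.replace("0", "I")
--     frog = frog.replace("1", "Like")
--     frog = frog.replace("2", "Frog")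
--     return frog
-- ===== SOURCE B (Python) =====
-- def english_to_frog(text:str=None) -> str:
--     """Convert text to "Frog-Talk": single pass, one word per ternary digit."""
--     if text is None:
--         return ""
--     words = ("I", "Like", "Frog")
--     parts = []
--     for ch in text:
--         n = ord(ch)
--         if n < 128:
--             block = []
--             for _ in range(5):
--                 n, d = divmod(n, 3)
--                 block.append(words[d])
--             parts.extend(reversed(block))
--     return "".join(parts)
-- ===== Notes on version B (the rewrite author's own statement) =====
-- stated objective: simpler
-- what changed: B drops the pad_num/decimal_to_ternary helpers and the three global str.replace passes: one pass per character extracts exactly five ternary digits with a fixed 5-iteration divmod loop and maps each digit straight to its word, joining a list at the end.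
import Mathlib
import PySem

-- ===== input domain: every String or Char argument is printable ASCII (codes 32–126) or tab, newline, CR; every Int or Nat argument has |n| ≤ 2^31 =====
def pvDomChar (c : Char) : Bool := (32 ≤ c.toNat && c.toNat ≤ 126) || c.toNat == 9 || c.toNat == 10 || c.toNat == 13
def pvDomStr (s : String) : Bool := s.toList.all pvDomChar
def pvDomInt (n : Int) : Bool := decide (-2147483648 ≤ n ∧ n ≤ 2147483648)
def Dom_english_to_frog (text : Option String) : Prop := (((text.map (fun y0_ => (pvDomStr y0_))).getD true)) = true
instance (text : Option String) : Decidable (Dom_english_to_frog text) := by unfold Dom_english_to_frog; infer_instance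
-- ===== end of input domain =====

-- B replaces A's pad_num/decimal_to_ternary helpers and three global replace passes by one
-- per-character pass (fixed 5-step divmod loop, digit mapped straight to its word); simpler,
-- return value proved equal on the ASCII domain.

-- ===== PORT A =====
-- Python strings are carried as List Char inside the helpers (PySem.Chars level, exact).

-- while len(padded) < length: padded = "0" + padded
def pad_num_loop (padded : List Char) (length : Int) : List Char :=
  if (padded.length : Int) < length then pad_num_loop ('0' :: padded) length else padded
termination_by (length - (padded.length : Int)).toNat
decreasing_by simp; omega

-- pad_num(num, length); the None branch recurses as pad_num("", length)
def pad_num (num : Option (List Char)) (length : Int) : List Char :=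
  match num with
  | none => pad_num_loop [] length
  | some s => pad_num_loop s length

def decimal_to_ternary (decimal : Int) : List Char :=
  if decimal < 1 then ['0']
  else
    let main := PySem.Int.floordiv decimal 3
    let remainder := PySem.Int.mod decimal 3
    if main = 0 then (PySem.Int.toStr remainder).toList
    else decimal_to_ternary main ++ (PySem.Int.toStr remainder).toList
termination_by decimal.toNat
decreasing_by
  rw [PySem.Int.floordiv_eq_ediv_of_pos (by norm_num : (0:Int) < 3)]
  omega

def english_to_frog (text : Option String) : String :=
  match text with
  | none => ""
  | some t =>
    let cs := t.toList
    -- for cnum in range(0, len(text)): char = ord(text[cnum]); index is always in range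
    let frog := (PySem.List.pyRange 0 (PySem.Str.len t) 1).foldl
      (fun frog cnum =>
        let char : Int := ((PySem.List.pyGetD cs cnum ' ').toNat : Int)
        if char < 128 then frog ++ pad_num (some (decimal_to_ternary char)) 5 else frog)
      ([] : List Char)
    let frog := PySem.Chars.replace frog ['0'] "I".toList
    let frog := PySem.Chars.replace frog ['1'] "Like".toList
    let frog := PySem.Chars.replace frog ['2'] "Frog".toList
    String.ofList frog

-- ===== PORT B =====
def english_to_frog_alt (text : Option String) : String :=
  match text with
  | none => ""
  | some t =>
    let words : List String := ["I", "Like", "Frog"]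
    let parts := t.toList.foldl
      (fun parts ch =>
        let n : Int := (ch.toNat : Int)
        if n < 128 then
          -- for _ in range(5): n, d = divmod(n, 3); block.append(words[d])
          let st := (PySem.List.pyRange 0 5 1).foldl
            (fun (st : Int × List String) _ =>
              let nd := (PySem.Int.divmod? st.1 3).getD (0, 0)  -- divisor 3 ≠ 0: exact
              (nd.1, st.2 ++ [PySem.List.pyGetD words nd.2 ""]))
            (n, ([] : List String))
          parts ++ st.2.reverse
        else parts)
      ([] : List String)
    PySem.Str.join "" parts

-- ===== PRECONDITION & SPEC =====
def Spec_english_to_frog (text : Option String) (out : String) : Prop := out = english_to_frog_alt text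
instance (text : Option String) (out : String) : Decidable (Spec_english_to_frog text out) := by unfold Spec_english_to_frog; infer_instance

-- ===== CLAIM (what is proved, stated in full; the proofs are below) =====
def Claim_equal_english_to_frog : Prop := ∀ (text : Option String), Dom_english_to_frog text → Spec_english_to_frog text (english_to_frog text)

-- ===== LEMMAS AND PROOFS =====

-- single-character str.replace is a per-character substitution
lemma replace_go_single (p : Char) (new : List Char) :
    ∀ (s : List Char) (fuel : Nat), s.length ≤ fuel → ∀ acc : List Char,
      PySem.Chars.replace.go [p] new fuel s acc
        = acc.reverse ++ s.flatMap (fun c => if c = p then new else [c]) := by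
  intro s
  induction s with
  | nil =>
    intro fuel _ acc
    cases fuel <;> simp [PySem.Chars.replace.go]
  | cons c t ih =>
    intro fuel hf acc
    cases fuel with
    | zero => simp at hf
    | succ f =>
      simp only [PySem.Chars.replace.go, List.isPrefixOf, List.flatMap_cons]
      by_cases hc : c = p
      · simp [hc, ih f (by simpa using hf)]
      · simp [hc, Ne.symm hc, ih f (by simpa using hf)]

lemma replace_single (s : List Char) (p : Char) (new : List Char) :
    PySem.Chars.replace s [p] new = s.flatMap (fun c => if c = p then new else [c]) := by
  simp [PySem.Chars.replace, replace_go_single p new s s.length le_rfl []]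

-- the padding while-loop prepends zeros
lemma pad_num_loop_eq : ∀ (k : Nat) (s : List Char) (L : Int),
    (L - (s.length : Int)).toNat = k → pad_num_loop s L = List.replicate k '0' ++ s := by
  intro k
  induction k with
  | zero =>
    intro s L h
    rw [pad_num_loop]
    simp only [if_neg (by omega : ¬ ((s.length : Int) < L))]
    simp
  | succ k ih =>
    intro s L h
    rw [pad_num_loop]
    simp only [if_pos (by omega : (s.length : Int) < L)]
    rw [ih ('0' :: s) L (by simp; omega), List.replicate_succ']
    simp

-- structural (fuel-based) counterpart of decimal_to_ternary on naturals
def tern : Nat → Nat → List Char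
  | 0, _ => []
  | f + 1, n =>
    if n / 3 = 0 then [Nat.digitChar (n % 3)]
    else tern f (n / 3) ++ [Nat.digitChar (n % 3)]

lemma toStr_small (r : Nat) (h : r < 3) :
    (PySem.Int.toStr ((r : Nat) : Int)).toList = [Nat.digitChar r] := by
  interval_cases r <;> decide

lemma decimal_to_ternary_eq_tern :
    ∀ (f n : Nat), 1 ≤ n → n ≤ f → decimal_to_ternary (n : Int) = tern f n := by
  intro f
  induction f with
  | zero => intro n h1 h2; omega
  | succ f ih =>
    intro n h1 h2
    have hfd : PySem.Int.floordiv (n : Int) 3 = ((n / 3 : Nat) : Int) := by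
      exact_mod_cast PySem.Int.floordiv_natCast n 3
    have hmd : PySem.Int.mod (n : Int) 3 = ((n % 3 : Nat) : Int) := by
      exact_mod_cast PySem.Int.mod_natCast n 3
    rw [decimal_to_ternary, if_neg (by omega : ¬ ((n : Int) < 1)), hfd, hmd, tern]
    by_cases hq : n / 3 = 0
    · rw [if_pos (by exact_mod_cast hq : ((n / 3 : Nat) : Int) = 0), if_pos hq,
        toStr_small (n % 3) (by omega)]
    · rw [if_neg (by exact_mod_cast hq : ¬ ((n / 3 : Nat) : Int) = 0), if_neg hq,
        ih (n / 3) (by omega) (by omega), toStr_small (n % 3) (by omega)]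

-- A's per-character block, in structural form
def blockA (m : Nat) : List Char :=
  let d := if m = 0 then ['0'] else tern 128 m
  List.replicate ((5 - (d.length : Int)).toNat) '0' ++ d

lemma pad_tern_eq_blockA (m : Nat) (hm : m < 128) :
    pad_num (some (decimal_to_ternary (m : Int))) 5 = blockA m := by
  rcases Nat.eq_zero_or_pos m with h0 | h1
  · subst h0
    have h : decimal_to_ternary ((0 : Nat) : Int) = ['0'] := by
      rw [decimal_to_ternary]; norm_num
    rw [pad_num, h, pad_num_loop_eq 4 ['0'] 5 (by simp)]
    decide
  · have hne : m ≠ 0 := by omega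
    rw [pad_num, decimal_to_ternary_eq_tern 128 m h1 (by omega)]
    rw [pad_num_loop_eq ((5 - ((tern 128 m).length : Int)).toNat) (tern 128 m) 5 rfl]
    simp [blockA, hne]

-- the decidable heart: A's word substitution of the padded ternary block equals
-- B's five divmod-extracted words, for every ASCII code
lemma block_eq : ∀ m : Nat, m < 128 →
    (blockA m).flatMap
        (fun x =>
          List.flatMap
            (fun y =>
              List.flatMap (fun c => if c = '2' then "Frog".toList else [c])
                (if y = '1' then "Like".toList else [y]))
            (if x = '0' then "I".toList else [x]))
      = ((List.foldl
            (fun (st : Int × List String) (_ : Int) =>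
              (((PySem.Int.divmod? st.1 3).getD (0, 0)).1,
                st.2 ++ [PySem.List.pyGetD ["I", "Like", "Frog"] ((PySem.Int.divmod? st.1 3).getD (0, 0)).2 ""]))
            ((m : Int), ([] : List String)) (PySem.List.pyRange 0 5 1)).2.reverse.map
          String.toList).flatten := by
  decide

lemma join_empty (parts : List (List Char)) :
    PySem.Chars.join [] parts = parts.flatten := by
  induction parts with
  | nil => simp [PySem.Chars.join_nil]
  | cons p rest ih =>
    cases rest with
    | nil => simp [PySem.Chars.join_singleton]
    | cons q rest' =>
      rw [PySem.Chars.join_cons_cons]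
      simp_all

lemma join_empty_flatMap (cs : List Char) (g : Char → List String) :
    PySem.Str.join "" (cs.flatMap g)
      = String.ofList (cs.flatMap (fun c => ((g c).map String.toList).flatten)) := by
  have h : (PySem.Str.join "" (cs.flatMap g)).toList
      = cs.flatMap (fun c => ((g c).map String.toList).flatten) := by
    rw [PySem.Str.toList_join]
    have : "".toList = ([] : List Char) := rfl
    rw [this, join_empty, List.flatten_eq_flatMap, List.map_flatMap, List.flatMap_assoc]
    simp only [← List.flatten_eq_flatMap]
  rw [← String.ofList_toList (s := PySem.Str.join "" (cs.flatMap g)), h]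

lemma dom_char_lt (c : Char) (h : pvDomChar c = true) : c.toNat < 128 := by
  simp [pvDomChar] at h
  omega

-- ===== VERDICT (by name: the statement is the Claim_ definition above) =====
theorem english_to_frog_spec : Claim_equal_english_to_frog := by
  intro text hdom
  unfold Spec_english_to_frog
  match text with
  | none => rfl
  | some t =>
    have hall : ∀ c ∈ t.toList, c.toNat < 128 := by
      intro c hc
      exact dom_char_lt c (by
        simp [Dom_english_to_frog, pvDomStr, List.all_eq_true] at hdom
        exact hdom c hc)
    show english_to_frog (some t) = english_to_frog_alt (some t)
    rw [english_to_frog, english_to_frog_alt]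
    simp only
    rw [show PySem.Str.len t = (t.toList.length : Int) from by simp [PySem.Str.len_eq]]
    rw [PySem.List.foldl_pyRange_zero_pyGetD' t.toList ' '
      (fun acc c =>
        if ((c.toNat : Int)) < 128 then acc ++ pad_num (some (decimal_to_ternary (c.toNat : Int))) 5 else acc)
      ([] : List Char)]
    -- the <128 test is true on every (ASCII-domain) character, on both sides
    have hA : List.foldl
        (fun (acc : List Char) (c : Char) =>
          if ((c.toNat : Int)) < 128 then acc ++ pad_num (some (decimal_to_ternary (c.toNat : Int))) 5 else acc)
        [] t.toList
        = t.toList.flatMap (fun c => pad_num (some (decimal_to_ternary (c.toNat : Int))) 5) := by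
      rw [PySem.List.foldl_congr_mem t.toList _
        (fun acc c => acc ++ pad_num (some (decimal_to_ternary (c.toNat : Int))) 5) []
        (by
          intro acc c hc
          simp only [if_pos (show ((c.toNat : Int)) < 128 by exact_mod_cast hall c hc)])]
      rw [PySem.List.foldl_append_eq_flatMap]
      rfl
    have hB : List.foldl
        (fun (parts : List String) (ch : Char) =>
          if ((ch.toNat : Int)) < 128 then
            parts ++
              (List.foldl
                (fun (st : Int × List String) (_ : Int) =>
                  (((PySem.Int.divmod? st.1 3).getD (0, 0)).1,
                    st.2 ++ [PySem.List.pyGetD ["I", "Like", "Frog"] ((PySem.Int.divmod? st.1 3).getD (0, 0)).2 ""]))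
                ((ch.toNat : Int), ([] : List String)) (PySem.List.pyRange 0 5 1)).2.reverse
          else parts)
        [] t.toList
        = t.toList.flatMap (fun ch =>
            (List.foldl
              (fun (st : Int × List String) (_ : Int) =>
                (((PySem.Int.divmod? st.1 3).getD (0, 0)).1,
                  st.2 ++ [PySem.List.pyGetD ["I", "Like", "Frog"] ((PySem.Int.divmod? st.1 3).getD (0, 0)).2 ""]))
              ((ch.toNat : Int), ([] : List String)) (PySem.List.pyRange 0 5 1)).2.reverse) := by
      rw [PySem.List.foldl_congr_mem t.toList _
        (fun parts ch => parts ++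
          (List.foldl
            (fun (st : Int × List String) (_ : Int) =>
              (((PySem.Int.divmod? st.1 3).getD (0, 0)).1,
                st.2 ++ [PySem.List.pyGetD ["I", "Like", "Frog"] ((PySem.Int.divmod? st.1 3).getD (0, 0)).2 ""]))
            ((ch.toNat : Int), ([] : List String)) (PySem.List.pyRange 0 5 1)).2.reverse) []
        (by
          intro acc c hc
          simp only [if_pos (show ((c.toNat : Int)) < 128 by exact_mod_cast hall c hc)])]
      rw [PySem.List.foldl_append_eq_flatMap]
      rfl
    rw [hA, hB, replace_single, replace_single, replace_single,
      List.flatMap_assoc, List.flatMap_assoc, List.flatMap_assoc, join_empty_flatMap]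
    apply congrArg String.ofList
    apply List.flatMap_congr
    intro c hc
    have hm := hall c hc
    rw [pad_tern_eq_blockA c.toNat hm]
    exact block_eq c.toNat hm
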